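-- pv_equiv track=rewrite | github.com/Prostochell-228/pythonProjectEGE | 3606.py | F
-- ===== SOURCE A (Python) =====
-- def F(n, stop, k):
--     if n == stop:
--         if k <= 5:
--             return 1
--         else:
--             return 0
--     if k > 5: return 0
--     if n < stop: return 0
--     if n > stop: return F(n + 1, stop, k + 1) + F(n * 2, stop, k + 1) + F(n + (n % 4), stop, k + 1)
-- ===== SOURCE B (Python) =====
-- def F(n, stop, k):
--     total = 0
--     stack = [(n, k)]
--     while stack:
--         m, j = stack.pop()
--         if m == stop:
--             if j <= 5:
--                 total += 1
--         elif j <= 5 and m > stop: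
--             stack.append((m + 1, j + 1))
--             stack.append((m * 2, j + 1))
--             stack.append((m + (m % 4), j + 1))
--     return total
-- ===== Notes on version B (the rewrite author's own statement) =====
-- stated objective: alternative
-- what changed: Replaced the three-way recursion by an explicit stack-based worklist loop with a running counter (no call stack, no recursion).
import Mathlib
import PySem

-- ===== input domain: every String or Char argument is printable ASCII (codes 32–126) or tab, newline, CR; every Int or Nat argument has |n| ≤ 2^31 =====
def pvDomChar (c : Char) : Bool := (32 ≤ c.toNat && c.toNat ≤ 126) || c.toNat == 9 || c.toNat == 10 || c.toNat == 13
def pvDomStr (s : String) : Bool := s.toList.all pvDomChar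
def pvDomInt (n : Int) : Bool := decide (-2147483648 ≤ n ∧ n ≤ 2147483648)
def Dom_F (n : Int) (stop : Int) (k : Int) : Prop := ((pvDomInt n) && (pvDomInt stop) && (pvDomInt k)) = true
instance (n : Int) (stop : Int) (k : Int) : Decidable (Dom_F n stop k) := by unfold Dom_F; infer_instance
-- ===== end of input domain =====

-- B replaces A's three-way recursion by an explicit stack worklist with a running counter (objective: alternative decomposition, same cost).


-- ===== PORT A =====
-- literal port of A; the final Python branch 'if n > stop' is the only case left
-- after n == stop and n < stop are excluded, so it is the trailing else here.
def F (n : Int) (stop : Int) (k : Int) : Int :=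
  if n = stop then
    (if k ≤ 5 then 1 else 0)
  else if k > 5 then 0
  else if n < stop then 0
  else F (n + 1) stop (k + 1) + F (n * 2) stop (k + 1) + F (n + PySem.Int.mod n 4) stop (k + 1)
termination_by (6 - k).toNat
decreasing_by all_goals omega

-- ===== PORT B =====
-- the while-stack loop of Source B; the Lean list head is the stack top, so the three
-- pushes (m+1), (m*2), (m+m%4) appear popped in reverse push order, as in Python.
def runF (stop : Int) (st : List (Int × Int)) (acc : Int) : Int :=
  match st with
  | [] => acc
  | (m, j) :: rest =>
    if m = stop then
      runF stop rest (if j ≤ 5 then acc + 1 else acc)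
    else if j ≤ 5 ∧ m > stop then
      runF stop ((m + PySem.Int.mod m 4, j + 1) :: (m * 2, j + 1) :: (m + 1, j + 1) :: rest) acc
    else
      runF stop rest acc
termination_by (st.map (fun p => 4 ^ (7 - p.2).toNat)).sum
decreasing_by
  · simp
  · have hj : (7 - j).toNat = (6 - j).toNat + 1 := by omega
    have hj2 : (7 - (j + 1)).toNat = (6 - j).toNat := by omega
    have h : 0 < 4 ^ (6 - j).toNat := pow_pos (by norm_num) _
    simp [hj, hj2, pow_succ]; omega
  · simp

def F_alt (n : Int) (stop : Int) (k : Int) : Int := runF stop [(n, k)] 0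

-- ===== PRECONDITION & SPEC =====
-- Pre_ excludes only the sliver n > stop ∧ k ≤ 5 ∧ k < -900, where the recursion depth 6-k is
-- at or beyond CPython's recursion limit: there Python A raises RecursionError (measured: for
-- k ≤ -990 at top level, earlier under any caller frames; the narrow remainder needs ~3^900
-- calls and never finishes). Every ordinarily computable input, including all k ≥ -900, is kept.
def Pre_F (n : Int) (stop : Int) (k : Int) : Prop := n ≤ stop ∨ 5 < k ∨ -900 ≤ k
instance (n : Int) (stop : Int) (k : Int) : Decidable (Pre_F n stop k) := by unfold Pre_F; infer_instance
def pvWitness_F : Int × Int × Int := (5, 3, 1)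
def Spec_F (n : Int) (stop : Int) (k : Int) (out : Int) : Prop := out = F_alt n stop k
instance (n : Int) (stop : Int) (k : Int) (out : Int) : Decidable (Spec_F n stop k out) := by unfold Spec_F; infer_instance

-- ===== CLAIM (what is proved, stated in full; the proofs are below) =====
def Claim_equal_F : Prop := ∀ (n : Int) (stop : Int) (k : Int), Dom_F n stop k → Pre_F n stop k → Spec_F n stop k (F n stop k)

-- ===== LEMMAS AND PROOFS =====
theorem F_at_stop (stop k : Int) : F stop stop k = if k ≤ 5 then 1 else 0 := by
  rw [F]; simp

theorem F_rec (m stop j : Int) (h1 : m ≠ stop) (h2 : j ≤ 5) (h3 : m > stop) :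
    F m stop j = F (m + 1) stop (j + 1) + F (m * 2) stop (j + 1)
      + F (m + PySem.Int.mod m 4) stop (j + 1) := by
  rw [F]
  rw [if_neg h1, if_neg (by omega : ¬ j > 5), if_neg (by omega : ¬ m < stop)]

theorem F_zero (m stop j : Int) (h1 : m ≠ stop) (h : ¬ (j ≤ 5 ∧ m > stop)) :
    F m stop j = 0 := by
  rw [F]; split_ifs <;> omega

-- loop invariant: the stack loop returns acc plus the sum of A's value over the frames
theorem runF_eq_sum (stop : Int) (st : List (Int × Int)) (acc : Int) :
    runF stop st acc = acc + (st.map (fun p => F p.1 stop p.2)).sum := by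
  fun_induction runF stop st acc with
  | case1 acc => simp
  | case2 acc j rest ih =>
    simp only [dite_eq_ite] at ih
    rw [ih]
    simp only [List.map_cons, List.sum_cons]
    rw [F_at_stop]
    split_ifs <;> omega
  | case3 acc m j rest hne hc ih =>
    rw [ih]
    simp only [List.map_cons, List.sum_cons]
    rw [F_rec m stop j hne hc.1 hc.2]
    omega
  | case4 acc m j rest hne hc ih =>
    rw [ih]
    simp only [List.map_cons, List.sum_cons]
    rw [F_zero m stop j hne hc]
    omega

-- ===== VERDICT (by name: the statement is the Claim_ definition above) =====
theorem F_spec : Claim_equal_F := by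
  intro n stop k _ _
  unfold Spec_F F_alt
  rw [runF_eq_sum]
  simp
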